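-- pv_equiv track=rewrite | github.com/jdevey/Euler-1-100-Solutions | Problem_080/main.py | get_sum_of_first_100
-- ===== SOURCE A (Python) =====
-- import math
--
-- def bs(n):
--     base = 0
--     jump = int(2 ** (math.floor(math.log(n, 2))))
--     while jump > 0:
--         test = base + jump
--         if test ** 2 < n:
--             base += jump
--         jump //= 2
--     return base
--
-- def get_sum_of_first_100(n):
--     zeros = 208
--     expanded = n * 10 ** zeros
--     sqrt = bs(expanded)
--     sqrt_str = str(sqrt)
--     s = 0
--     cnt = 0
--     for c in sqrt_str:
--         s += ord(c) - ord('0')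
--         cnt += 1
--         if (cnt == 100):
--             break
--     return s
-- ===== SOURCE B (Python) =====
-- import math
--
-- def get_sum_of_first_100(n):
--     # math.isqrt(expanded - 1) equals A's binary search bs(expanded): the
--     # largest root with root**2 < expanded (note the strict inequality).
--     expanded = n * 10 ** 208
--     root = math.isqrt(expanded - 1)
--     return sum(ord(c) - 48 for c in str(root)[:100])
-- ===== Notes on version B (the rewrite author's own statement) =====
-- stated objective: idiomatic
-- what changed: Replaces the hand-rolled float-log-seeded binary search for the integer square root by the standard library math.isqrt applied to expanded-1 (matching A's strict base**2 < expanded convention), and replaces the counter-and-break digit loop by summing over the first-100-characters slice.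
import Mathlib
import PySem

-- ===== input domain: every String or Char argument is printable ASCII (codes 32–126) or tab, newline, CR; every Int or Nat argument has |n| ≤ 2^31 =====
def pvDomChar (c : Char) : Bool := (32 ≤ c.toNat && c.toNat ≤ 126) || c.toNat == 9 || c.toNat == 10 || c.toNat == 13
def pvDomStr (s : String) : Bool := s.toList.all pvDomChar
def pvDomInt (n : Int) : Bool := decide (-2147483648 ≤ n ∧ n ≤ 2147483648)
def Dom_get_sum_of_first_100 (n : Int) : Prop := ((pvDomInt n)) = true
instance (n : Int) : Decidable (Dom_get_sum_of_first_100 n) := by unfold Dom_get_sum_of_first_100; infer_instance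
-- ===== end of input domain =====

-- B replaces A's hand-rolled binary-search integer square root by the library
-- isqrt on expanded-1 and sums the first-100-character slice (idiomatic; same cost class).

-- ===== PORT A =====
-- `while jump > 0: … jump //= 2`, jump kept as a Nat (it is a nonnegative power of two).
def bsLoop (N : Int) (base : Int) (jump : Nat) : Int :=
  if h : jump = 0 then base
  else
    -- test = base + jump; if test ** 2 < n: base += jump
    bsLoop N (if (base + (jump : Int)) ^ 2 < N then base + (jump : Int) else base) (jump / 2)
  termination_by jump
  decreasing_by exact Nat.div_lt_self (Nat.pos_of_ne_zero h) one_lt_two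

-- `jump = int(2 ** (math.floor(math.log(n, 2))))`, ported as the exact-real value
-- 2 ^ ⌊log₂ n⌋; float rounding of math.log can shift this seed by one power of two,
-- which cannot change bsLoop's result (any seed ≥ the answer works).
def bsA (n : Int) : Int := bsLoop n 0 (2 ^ (Nat.log 2 n.toNat))

-- A's digit loop: s += ord(c) - ord('0'); cnt += 1; break at cnt == 100.
def sumLoopA (chars : List Char) (s : Int) (cnt : Int) : Int :=
  match chars with
  | [] => s
  | c :: rest =>
    let s := s + ((c.toNat : Int) - 48)
    let cnt := cnt + 1
    if cnt = 100 then s else sumLoopA rest s cnt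

def get_sum_of_first_100 (n : Int) : Int :=
  let expanded := n * 10 ^ 208
  let sqrt := bsA expanded
  sumLoopA (PySem.Int.toStr sqrt).toList 0 0

-- ===== PORT B =====
-- math.isqrt ↦ Nat.sqrt (library call ported as the corresponding Lean function).
def get_sum_of_first_100_alt (n : Int) : Int :=
  let expanded := n * 10 ^ 208
  let root : Int := (Nat.sqrt (expanded - 1).toNat : Int)
  (((PySem.Str.slice (PySem.Int.toStr root) none (some 100)).toList).map
      (fun c => ((c.toNat : Int) - 48))).sum

-- ===== PRECONDITION & SPEC =====
-- A raises ValueError (math domain error of math.log) for n ≤ 0; B's isqrt raises there too.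
def Pre_get_sum_of_first_100 (n : Int) : Prop := 1 ≤ n
instance (n : Int) : Decidable (Pre_get_sum_of_first_100 n) := by unfold Pre_get_sum_of_first_100; infer_instance
def pvWitness_get_sum_of_first_100 : Int := 2

def Spec_get_sum_of_first_100 (n : Int) (out : Int) : Prop := out = get_sum_of_first_100_alt n
instance (n : Int) (out : Int) : Decidable (Spec_get_sum_of_first_100 n out) := by unfold Spec_get_sum_of_first_100; infer_instance

-- ===== CLAIM (what is proved, stated in full; the proofs are below) =====
def Claim_equal_get_sum_of_first_100 : Prop := ∀ (n : Int), Dom_get_sum_of_first_100 n → Pre_get_sum_of_first_100 n → Spec_get_sum_of_first_100 n (get_sum_of_first_100 n)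

-- ===== LEMMAS AND PROOFS =====

-- Binary-search invariant: from a base below the root with a seed reaching past it,
-- bsLoop lands on the largest r with r^2 < N.
theorem bsLoop_spec (N : Int) : ∀ (e : Nat) (base : Int), 0 ≤ base → base ^ 2 < N →
    N ≤ (base + 2 * 2 ^ e) ^ 2 →
    0 ≤ bsLoop N base (2 ^ e) ∧ (bsLoop N base (2 ^ e)) ^ 2 < N ∧ N ≤ (bsLoop N base (2 ^ e) + 1) ^ 2 := by
  intro e
  induction e with
  | zero =>
    intro base hb h1 h2
    have h0 : ∀ b : Int, bsLoop N b 0 = b := fun b => by rw [bsLoop]; rfl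
    rw [show (2:Nat)^0 = 1 from rfl, bsLoop]
    norm_num [h0]
    split_ifs with h
    · refine ⟨by omega, h, ?_⟩
      nlinarith
    · refine ⟨hb, h1, by nlinarith⟩
  | succ e ih =>
    intro base hb h1 h2
    rw [bsLoop]
    have hne : (2 : Nat) ^ (e + 1) ≠ 0 := by positivity
    have hdiv : (2 : Nat) ^ (e + 1) / 2 = 2 ^ e := by
      rw [pow_succ]; exact Nat.mul_div_cancel _ (by norm_num)
    have hcast : ((2 ^ (e + 1) : Nat) : Int) = 2 * 2 ^ e := by push_cast; ring
    simp only [hne, hdiv, dif_neg, not_false_iff, hcast]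
    have hp : (2:Int) ^ (e + 1) = 2 * 2 ^ e := by ring
    rw [hp] at h2
    split_ifs with h
    · exact ih (base + 2 * 2 ^ e) (add_nonneg hb (by positivity)) h (by nlinarith)
    · rw [not_lt] at h
      exact ih base hb h1 h

theorem bsA_eq_sqrt (N : Int) (hN : 1 ≤ N) : bsA N = (Nat.sqrt (N - 1).toNat : Int) := by
  set e := Nat.log 2 N.toNat with he
  have hseed : N ≤ (0 + 2 * 2 ^ e) ^ 2 := by
    have h1 : N.toNat < 2 ^ (e + 1) := Nat.lt_pow_succ_log_self (by norm_num) _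
    have h2 : (N.toNat : Int) = N := Int.toNat_of_nonneg (by omega)
    have h3 : N < 2 * 2 ^ (e : Nat) := by
      rw [← h2]
      calc (N.toNat : Int) < ((2 ^ (e + 1) : Nat) : Int) := by exact_mod_cast h1
        _ = 2 * 2 ^ (e : Nat) := by push_cast; ring
    have h4 : (1 : Int) ≤ 2 ^ (e : Nat) := one_le_pow₀ (by norm_num)
    nlinarith
  obtain ⟨hr0, hr1, hr2⟩ := bsLoop_spec N e 0 le_rfl (by norm_num; omega) hseed
  -- the library root s := Nat.sqrt (N-1).toNat satisfies the same characterization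
  set s : Int := (Nat.sqrt (N - 1).toNat : Int) with hs
  have hm : ((N - 1).toNat : Int) = N - 1 := Int.toNat_of_nonneg (by omega)
  have hs1 : s ^ 2 < N := by
    have h := Nat.sqrt_le' (N - 1).toNat
    have h' : ((Nat.sqrt (N - 1).toNat : Nat) : Int) ^ 2 ≤ ((N - 1).toNat : Int) := by exact_mod_cast h
    rw [hm] at h'; nlinarith
  have hs2 : N ≤ (s + 1) ^ 2 := by
    have h := Nat.lt_succ_sqrt' (N - 1).toNat
    have h' : ((N - 1).toNat : Int) < ((Nat.sqrt (N - 1).toNat : Nat) : Int) ^ 2 + 2 * ((Nat.sqrt (N - 1).toNat : Nat) : Int) + 1 := by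
      have h2 : (N - 1).toNat < (Nat.sqrt (N - 1).toNat + 1) ^ 2 := by
        simpa [Nat.succ_eq_add_one, pow_two] using h
      calc ((N - 1).toNat : Int) < (((Nat.sqrt (N - 1).toNat + 1) ^ 2 : Nat) : Int) := by exact_mod_cast h2
        _ = ((Nat.sqrt (N - 1).toNat : Nat) : Int) ^ 2 + 2 * ((Nat.sqrt (N - 1).toNat : Nat) : Int) + 1 := by push_cast; ring
    rw [hm] at h'; nlinarith
  have hs0 : 0 ≤ s := Int.natCast_nonneg _
  -- uniqueness of the r with 0 ≤ r, r² < N ≤ (r+1)²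
  have hbs : bsA N = bsLoop N 0 (2 ^ e) := rfl
  rw [hbs]
  nlinarith [hr1, hr2, hs1, hs2, hr0, hs0]

-- A's counter-and-break loop is the digit sum of the first k remaining characters.
theorem sumLoopA_eq : ∀ (chars : List Char) (s : Int) (k : Nat), 0 < k → k ≤ 100 →
    sumLoopA chars s (100 - (k : Int)) = s + ((chars.take k).map (fun c => ((c.toNat : Int) - 48))).sum := by
  intro chars
  induction chars with
  | nil => intro s k _ _; simp [sumLoopA]
  | cons c rest ih =>
    intro s k hk hk100
    rw [sumLoopA]
    by_cases h1 : k = 1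
    · subst h1
      norm_num
    · have hk2 : 2 ≤ k := by omega
      have hne : ¬(100 - (k : Int) + 1 = 100) := by omega
      rw [if_neg hne]
      have : (100 : Int) - (k : Int) + 1 = 100 - ((k - 1 : Nat) : Int) := by omega
      rw [this, ih _ (k - 1) (by omega) (by omega)]
      obtain ⟨k', rfl⟩ : ∃ k', k = k' + 1 := ⟨k - 1, by omega⟩
      simp [List.take_succ_cons]
      ring

-- ===== VERDICT (by name: the statement is the Claim_ definition above) =====
theorem get_sum_of_first_100_spec : Claim_equal_get_sum_of_first_100 := by
  intro n _ hpre
  unfold Spec_get_sum_of_first_100 get_sum_of_first_100 get_sum_of_first_100_alt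
  simp only
  have h1 : 1 ≤ n := hpre
  have hN : 1 ≤ n * 10 ^ 208 := by nlinarith
  rw [bsA_eq_sqrt _ hN]
  have hslice : (PySem.Str.slice (PySem.Int.toStr ((Nat.sqrt (n * 10 ^ 208 - 1).toNat : Nat) : Int)) none (some 100)).toList
      = (PySem.Int.toStr ((Nat.sqrt (n * 10 ^ 208 - 1).toNat : Nat) : Int)).toList.take 100 := by
    rw [PySem.Str.toList_slice]
    exact_mod_cast PySem.List.slice_to_natCast (b := 100) _
  rw [hslice]
  have heq := sumLoopA_eq (PySem.Int.toStr ((Nat.sqrt (n * 10 ^ 208 - 1).toNat : Nat) : Int)).toList 0 100 (by norm_num) le_rfl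
  simp only [Nat.cast_ofNat, sub_self, zero_add] at heq
  exact heq
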